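-- pv_equiv track=rewrite | github.com/karasekadam/authorship_identification | data_loader.py | email_subject
-- ===== SOURCE A (Python) =====
-- def email_subject(text: str) -> list[int]:
--     subject_index_start = text.find("Subject: ")
--     if subject_index_start == -1:
--         return [0, 0, 0, 0, 0]
--
--     subject_index_end_mime = text.find("Mime-Version:", subject_index_start)
--     subject_index_end_cc = text.find("Cc:", subject_index_start)
--     if subject_index_end_mime == -1 and subject_index_end_cc == -1:
--         return [0, 0, 0, 0, 0]
--     elif subject_index_end_mime == -1:
--         subject_index_end = subject_index_end_cc
--     elif subject_index_end_cc == -1: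
--         subject_index_end = subject_index_end_mime
--     else:
--         subject_index_end = min(subject_index_end_mime, subject_index_end_cc)
--
--     subject = text[subject_index_start + 9: subject_index_end]
--     number_of_words = len(subject.split(" "))
--     number_of_characters = len(subject)
--     number_of_uppercase_characters = sum(1 for c in subject if c.isupper())
--     number_od_numeric_characters = sum(1 for c in subject if c.isnumeric())
--     number_of_punctuation_marks = sum(1 for c in subject if c in [".", ",", "!", "?", ";", ":", "-", "_", "(", ")"])
--
--     return [number_of_words, number_of_characters, number_of_uppercase_characters, number_od_numeric_characters,
--             number_of_punctuation_marks]
-- ===== SOURCE B (Python) =====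
-- def email_subject(text: str) -> list[int]:
--     start = text.find("Subject: ")
--     if start == -1:
--         return [0, 0, 0, 0, 0]
--
--     ends = [i for i in (text.find("Mime-Version:", start), text.find("Cc:", start)) if i != -1]
--     if not ends:
--         return [0, 0, 0, 0, 0]
--
--     subject = text[start + 9: min(ends)]
--     # histogram: evaluate each predicate once per DISTINCT character
--     hist = {}
--     for ch in subject:
--         hist[ch] = hist.get(ch, 0) + 1
--     words = hist.get(" ", 0) + 1
--     chars = sum(hist.values())
--     upper = sum(n for ch, n in hist.items() if ch.isupper())
--     numeric = sum(n for ch, n in hist.items() if ch.isnumeric())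
--     punct = sum(n for ch, n in hist.items() if ch in ".,!?;:-_()")
--     return [words, chars, upper, numeric, punct]
-- ===== Notes on version B (the rewrite author's own statement) =====
-- stated objective: alternative
-- what changed: A scans the extracted subject four separate times, applying each character predicate to every character (a split plus three generator sums); B instead builds a character-frequency dictionary (histogram) in one pass and derives all five features from it: word count is the space entry plus one, character count is the sum of all frequencies, and the three category counts sum frequencies over the distinct keys, so each predicate runs once per distinct character.
import Mathlib
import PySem

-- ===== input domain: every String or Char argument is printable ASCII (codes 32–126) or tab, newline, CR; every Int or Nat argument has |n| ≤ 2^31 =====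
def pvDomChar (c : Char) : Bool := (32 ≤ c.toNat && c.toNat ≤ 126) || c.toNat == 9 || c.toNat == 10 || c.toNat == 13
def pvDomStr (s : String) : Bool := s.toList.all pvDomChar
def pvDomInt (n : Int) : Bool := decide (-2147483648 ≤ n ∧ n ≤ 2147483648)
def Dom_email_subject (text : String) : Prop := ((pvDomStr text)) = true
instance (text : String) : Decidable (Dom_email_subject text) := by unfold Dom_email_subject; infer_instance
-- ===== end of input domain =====

-- B replaces A's four per-character scans of the subject with a character-frequency
-- dictionary built once, from which all five features are read off (objective: alternative).
-- 'isnumeric' is ported as PySem.Chars.isdigit, exact on the ASCII input domain.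

-- ===== PORT A =====
-- punctuation list from A, as characters (A tests 1-char strings for membership in a list)
def pvPunct : List Char := ['.', ',', '!', '?', ';', ':', '-', '_', '(', ')']

def email_subject (text : String) : List Int :=
  let subject_index_start := PySem.Str.find text "Subject: "
  if subject_index_start = -1 then [0, 0, 0, 0, 0]
  else
    let subject_index_end_mime := PySem.Str.findFrom text "Mime-Version:" subject_index_start
    let subject_index_end_cc := PySem.Str.findFrom text "Cc:" subject_index_start
    if subject_index_end_mime = -1 ∧ subject_index_end_cc = -1 then [0, 0, 0, 0, 0]
    else
      let subject_index_end :=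
        if subject_index_end_mime = -1 then subject_index_end_cc
        else if subject_index_end_cc = -1 then subject_index_end_mime
        else min subject_index_end_mime subject_index_end_cc
      let subject := PySem.Str.slice text (some (subject_index_start + 9)) (some subject_index_end)
      -- sep " " is nonempty so split? is always some; getD [] only discharges the Option
      let number_of_words : Int := ((PySem.Str.split? subject " ").getD []).length
      let number_of_characters : Int := PySem.Str.len subject
      -- sum(1 for c in subject if p(c)) ported as summing 1 over the filtered characters
      let number_of_uppercase_characters : Int :=
        (((subject.toList.filter (fun c => PySem.Chars.isupper c)).map (fun _ => (1 : Int))).sum)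
      let number_od_numeric_characters : Int :=
        (((subject.toList.filter (fun c => PySem.Chars.isdigit c)).map (fun _ => (1 : Int))).sum)
      let number_of_punctuation_marks : Int :=
        (((subject.toList.filter (fun c => pvPunct.contains c)).map (fun _ => (1 : Int))).sum)
      [number_of_words, number_of_characters, number_of_uppercase_characters,
       number_od_numeric_characters, number_of_punctuation_marks]

-- ===== PORT B =====
def email_subject_alt (text : String) : List Int :=
  let start := PySem.Str.find text "Subject: "
  if start = -1 then [0, 0, 0, 0, 0]
  else
    let ends := [PySem.Str.findFrom text "Mime-Version:" start,
                 PySem.Str.findFrom text "Cc:" start].filter (fun i => i ≠ -1)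
    match PySem.List.min? ends (fun i => i) with
    | none => [0, 0, 0, 0, 0]
    | some e =>
      let subject := PySem.Str.slice text (some (start + 9)) (some e)
      -- the histogram loop: hist[ch] = hist.get(ch, 0) + 1
      let hist : PySem.Dict Char Int :=
        subject.toList.foldl (fun d ch => d.insert ch (d.getD ch 0 + 1)) PySem.Dict.empty
      let words := hist.getD ' ' 0 + 1
      let chars := hist.values.sum
      let upper := ((hist.items.filter (fun kv => PySem.Chars.isupper kv.1)).map (·.2)).sum
      let numeric := ((hist.items.filter (fun kv => PySem.Chars.isdigit kv.1)).map (·.2)).sum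
      let punct := ((hist.items.filter
          (fun kv => PySem.Str.isIn (String.ofList [kv.1]) ".,!?;:-_()")).map (·.2)).sum
      [words, chars, upper, numeric, punct]

-- ===== PRECONDITION & SPEC =====
def Spec_email_subject (text : String) (out : List Int) : Prop := out = email_subject_alt text
instance (text : String) (out : List Int) : Decidable (Spec_email_subject text out) := by unfold Spec_email_subject; infer_instance

-- ===== CLAIM (what is proved, stated in full; the proofs are below) =====
def Claim_equal_email_subject : Prop := ∀ (text : String), Dom_email_subject text → Spec_email_subject text (email_subject text)

-- ===== LEMMAS AND PROOFS =====

-- length of a single-char-separator split is (count of the separator) + 1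
theorem splitOn_go_length (c : Char) (fuel : ℕ) (l cur : List Char) (acc : List (List Char))
    (h : l.length < fuel) :
    (PySem.Chars.splitOn.go [c] fuel l cur acc).length = acc.length + 1 + l.count c := by
  induction fuel generalizing l cur acc with
  | zero => omega
  | succ n ih =>
    cases l with
    | nil => simp [PySem.Chars.splitOn.go]
    | cons c' rest =>
      simp only [PySem.Chars.splitOn.go]
      by_cases hc : c' = c
      · subst hc
        simp only [List.isPrefixOf, beq_self_eq_true, Bool.true_and, if_pos]
        rw [ih _ _ _ (by simpa using Nat.lt_of_succ_lt_succ h)]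
        simp
        omega
      · have hpf : ([c].isPrefixOf (c' :: rest)) = false := by
          simp [List.isPrefixOf]
          exact fun h' => absurd h'.symm hc
        rw [hpf]
        simp only [Bool.false_eq_true, if_false]
        rw [ih _ _ _ (Nat.lt_of_succ_lt_succ h)]
        simp [hc]

theorem splitOn_length (c : Char) (l : List Char) :
    (PySem.Chars.splitOn l [c]).length = l.count c + 1 := by
  unfold PySem.Chars.splitOn
  rw [splitOn_go_length c _ l [] [] (by omega)]
  simp; omega

theorem words_eq (s : String) :
    (((PySem.Str.split? s " ").getD []).length : Int) = ((s.toList.count ' ' : ℕ) : Int) + 1 := by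
  unfold PySem.Str.split? PySem.Chars.split?
  rw [show (" " : String).toList = [' '] from rfl]
  simp [splitOn_length]

-- sum of the constant 1 over a filter is countP
theorem sum_one_filter (p : Char → Bool) (l : List Char) :
    ((l.filter p).map (fun _ => (1 : Int))).sum = ((l.countP p : ℕ) : Int) := by
  simp [List.map_const', List.sum_replicate, List.countP_eq_length_filter]

-- 'c in s' for a one-character string is list membership of the character
theorem isIn_single (c : Char) (l : List Char) :
    PySem.Chars.isIn [c] l = l.contains c := by
  by_cases h : c ∈ l
  · obtain ⟨s, t, rfl⟩ := List.append_of_mem h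
    rw [(PySem.Chars.isIn_iff_infix _ _).mpr ⟨s, t, by simp⟩]
    simp
  · rw [(PySem.Chars.isIn_eq_false_iff _ _).mpr ?_]
    · simp
      intro hm
      exact absurd hm h
    · intro hinf
      rcases hinf with ⟨s, t, hst⟩
      apply h
      rw [← hst]
      simp

-- the punctuation membership test of B agrees with A's list membership
theorem punct_eq (c : Char) :
    PySem.Str.isIn (String.ofList [c]) ".,!?;:-_()" = pvPunct.contains c := by
  rw [PySem.Str.isIn_eq]
  rw [show (String.ofList [c]).toList = [c] by simp]
  rw [show (".,!?;:-_()" : String).toList = pvPunct from rfl]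
  exact isIn_single c pvPunct

-- summing the multiplicity of every distinct character satisfying p recovers countP
theorem sum_count_distinct (p : Char → Bool) (l : List Char) :
    (((PySem.Set.ofList l).filter p).map (fun k => ((l.count k : ℕ) : Int))).sum
      = ((l.countP p : ℕ) : Int) := by
  have hperm : (PySem.Set.ofList l : List Char).Perm l.dedup :=
    (List.perm_ext_iff_of_nodup (PySem.Set.nodup_ofList l) l.nodup_dedup).mpr
      (fun x => by simp [PySem.Set.mem_ofList, List.mem_dedup])
  rw [((hperm.filter p).map (fun k => ((l.count k : ℕ) : Int))).sum_eq]
  have : ((l.dedup.filter p).map fun k => ((l.count k : ℕ) : Int))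
      = ((l.dedup.filter p).map (fun k => l.count k)).map (fun n : ℕ => (n : Int)) := by
    simp [List.map_map, Function.comp]
  rw [this, ← Nat.cast_list_sum, List.sum_map_count_dedup_filter_eq_countP]

-- a filtered sum over the histogram's items is countP over the original characters
theorem hist_items_sum (p : Char → Bool) (l : List Char) :
    (((PySem.Dict.counter l).items.filter (fun kv => p kv.1)).map (·.2)).sum
      = ((l.countP p : ℕ) : Int) := by
  rw [PySem.Dict.items_counter]
  rw [List.filter_map, List.map_map]
  exact sum_count_distinct p l

-- the histogram's values sum to the character count
theorem hist_values_sum (l : List Char) :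
    (PySem.Dict.counter l).values.sum = ((l.length : ℕ) : Int) := by
  have h := hist_items_sum (fun _ => true) l
  simp only [List.filter_true, List.countP_true] at h
  simpa [PySem.Dict.values] using h

-- min? of the filtered two-element list matches A's branch cascade
theorem min_branches (m c : Int) (h : ¬ (m = -1 ∧ c = -1)) :
    PySem.List.min? ([m, c].filter (fun i => i ≠ -1)) (fun i => i) =
      some (if m = -1 then c else if c = -1 then m else min m c) := by
  by_cases hm : m = -1 <;> by_cases hc : c = -1 <;>
    simp [PySem.List.min?, hm, hc, min_def] at h ⊢ <;> split_ifs <;> simp_all <;> omega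

-- ===== VERDICT (by name: the statement is the Claim_ definition above) =====
set_option maxHeartbeats 1000000 in
theorem email_subject_spec : Claim_equal_email_subject := by
  intro text _
  unfold Spec_email_subject email_subject email_subject_alt
  simp only []
  by_cases h0 : PySem.Str.find text "Subject: " = -1
  · rw [if_pos h0, if_pos h0]
  · rw [if_neg h0, if_neg h0]
    by_cases h1 : PySem.Str.findFrom text "Mime-Version:" (PySem.Str.find text "Subject: ") = -1 ∧
        PySem.Str.findFrom text "Cc:" (PySem.Str.find text "Subject: ") = -1
    · obtain ⟨e1, e2⟩ := h1
      rw [if_pos ⟨e1, e2⟩, e1, e2]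
      rfl
    · rw [if_neg h1, min_branches _ _ h1]
      dsimp only
      rw [PySem.Dict.foldl_insert_getD_add_one_eq_counter]
      simp only [words_eq, sum_one_filter, PySem.Str.len_eq, PySem.Dict.getD_counter,
        hist_values_sum, hist_items_sum, punct_eq]
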